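-- pv_equiv track=rewrite | github.com/pypi-data/pypi-mirror-377 | packages/web-research-agent/web_research_agent-1.1.12-py3-none-any.whl/utils/formatters/formatters.py | _find_best_entity_match
-- ===== SOURCE A (Python) =====
-- from typing import Dict, List, Any
--
-- def _find_best_entity_match(entities: List[str], focus_terms: List[str]) -> str:
--     """Find the entity that best matches the focus terms."""
--     if not entities:
--         return None
--
--     if not focus_terms:
--         return entities[0]  # Return first entity if no focus terms
--
--     # Score each entity based on how many focus terms it contains
--     scores = []
--     for entity in entities:
--         entity_lower = entity.lower()
--         score = sum(1 for term in focus_terms if term.lower() in entity_lower)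
--         scores.append((entity, score))
--
--     # Return the entity with the highest score, or the first entity if no matches
--     scores.sort(key=lambda x: x[1], reverse=True)
--     return scores[0][0] if scores else entities[0]
-- ===== SOURCE B (Python) =====
-- def _find_best_entity_match(entities, focus_terms):
--     """Find the entity that best matches the focus terms (single pass, no sort)."""
--     if not entities:
--         return None
--     if not focus_terms:
--         return entities[0]
--
--     def score(entity):
--         el = entity.lower()
--         return sum(1 for term in focus_terms if term.lower() in el)
--
--     best_entity = entities[0]
--     best_score = score(best_entity)
--     for entity in entities[1:]:
--         s = score(entity)
--         if best_score < s:
--             best_entity, best_score = entity, s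
--     return best_entity
-- ===== Notes on version B (the rewrite author's own statement) =====
-- stated objective: simpler
-- what changed: Replaces the build-a-scores-list-then-stable-reverse-sort selection with a single running-best pass that keeps the first entity whose score is strictly greater than the best so far.
import Mathlib
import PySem

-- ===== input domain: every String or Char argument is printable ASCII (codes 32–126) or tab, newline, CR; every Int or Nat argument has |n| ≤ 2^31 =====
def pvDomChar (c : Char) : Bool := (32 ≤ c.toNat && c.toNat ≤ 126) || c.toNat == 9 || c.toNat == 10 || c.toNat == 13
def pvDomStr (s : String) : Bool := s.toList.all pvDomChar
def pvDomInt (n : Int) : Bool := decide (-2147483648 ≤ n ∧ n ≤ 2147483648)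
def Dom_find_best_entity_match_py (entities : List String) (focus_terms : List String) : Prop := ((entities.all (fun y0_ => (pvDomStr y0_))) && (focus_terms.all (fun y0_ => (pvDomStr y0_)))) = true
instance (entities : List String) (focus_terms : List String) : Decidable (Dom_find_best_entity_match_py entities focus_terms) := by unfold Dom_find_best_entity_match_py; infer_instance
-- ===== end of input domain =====

-- B replaces A's scores-list + stable reverse sort with a single running-best pass (strict '>' keeps the first max); objective: simpler.


-- ===== PORT A =====
-- scores list built by appending (entity, score); then a stable reverse sort on the score, head taken.
def find_best_entity_match_py (entities : List String) (focus_terms : List String) : Option String :=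
  match entities with
  | [] => none
  | e0 :: _ =>
    if focus_terms = [] then some e0
    else
      let scores : List (String × Nat) := entities.foldl (fun acc entity =>
        acc ++ [(entity, focus_terms.countP (fun term =>
          PySem.Chars.isIn (PySem.Chars.lower term.toList) (PySem.Chars.lower entity.toList)))]) []
      match PySem.List.sorted scores (fun p => p.2) true with
      | [] => some e0
      | p :: _ => some p.1

-- ===== PORT B =====
-- single pass: running best entity/score, updated only on a strictly greater score.
def find_best_entity_match_py_alt (entities : List String) (focus_terms : List String) : Option String :=
  match entities with
  | [] => none
  | e0 :: rest =>
    if focus_terms = [] then some e0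
    else
      let score : String → Nat := fun e => focus_terms.countP (fun term =>
        PySem.Chars.isIn (PySem.Chars.lower term.toList) (PySem.Chars.lower e.toList))
      some ((rest.foldl (fun best e =>
        let s := score e
        if best.2 < s then (e, s) else best) (e0, score e0)).1)

-- ===== PRECONDITION & SPEC =====
def Spec_find_best_entity_match_py (entities : List String) (focus_terms : List String) (out : Option String) : Prop := out = find_best_entity_match_py_alt entities focus_terms
instance (entities : List String) (focus_terms : List String) (out : Option String) : Decidable (Spec_find_best_entity_match_py entities focus_terms out) := by unfold Spec_find_best_entity_match_py; infer_instance

-- ===== CLAIM (what is proved, stated in full; the proofs are below) =====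
def Claim_equal_find_best_entity_match_py : Prop := ∀ (entities : List String) (focus_terms : List String), Dom_find_best_entity_match_py entities focus_terms → Spec_find_best_entity_match_py entities focus_terms (find_best_entity_match_py entities focus_terms)

-- ===== LEMMAS AND PROOFS =====

-- head of insertion-sorting (reverse order, strict insertion) a list onto a nonempty accumulator
-- is the running strict-first-max of the accumulator's head and the inserted elements.
theorem head_insort {α : Type} (key : α → Nat) :
    ∀ (xs : List α) (h : α) (t : List α), ∃ t',
      xs.foldl (fun acc x => PySem.List.insertBy (fun a b => decide (key b < key a)) x acc) (h :: t)
        = xs.foldl (fun b x => if key b < key x then x else b) h :: t' := by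
  intro xs
  induction xs with
  | nil => intro h t; exact ⟨t, rfl⟩
  | cons x xs ih =>
    intro h t
    by_cases hk : key h < key x
    · simpa [List.foldl, PySem.List.insertBy, hk] using ih x (h :: t)
    · simpa [List.foldl, PySem.List.insertBy, hk] using ih h (PySem.List.insertBy (fun a b => decide (key b < key a)) x t)

-- head of the stable reverse sort of a nonempty list is the first element with maximal key.
theorem head_sorted_rev {α : Type} (key : α → Nat) (p : α) (ps : List α) :
    ∃ t', PySem.List.sorted (p :: ps) key true
        = ps.foldl (fun b x => if key b < key x then x else b) p :: t' := by
  rw [PySem.List.sorted_rev_eq_foldl_insertBy]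
  simpa [List.foldl, PySem.List.insertBy] using head_insort key ps p []

-- ===== VERDICT (by name: the statement is the Claim_ definition above) =====
theorem find_best_entity_match_py_spec : Claim_equal_find_best_entity_match_py := by
  intro entities focus_terms _
  unfold Spec_find_best_entity_match_py find_best_entity_match_py find_best_entity_match_py_alt
  match entities with
  | [] => rfl
  | e0 :: rest =>
    by_cases hf : focus_terms = []
    · simp [hf]
    · simp only [hf, if_false]
      set f : String → Nat := fun e => focus_terms.countP (fun term =>
        PySem.Chars.isIn (PySem.Chars.lower term.toList) (PySem.Chars.lower e.toList)) with hfdef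
      have hscores : (e0 :: rest).foldl (fun acc entity =>
          acc ++ [(entity, f entity)]) ([] : List (String × Nat))
          = (e0, f e0) :: rest.map (fun e => (e, f e)) := by
        simpa using PySem.List.foldl_append_singleton_eq_map (fun e => (e, f e)) (e0 :: rest) []
      rw [hscores]
      obtain ⟨t', ht⟩ := head_sorted_rev (fun p : String × Nat => p.2) (e0, f e0)
        (rest.map (fun e => (e, f e)))
      rw [ht]
      simp only [List.foldl_map]
      rfl
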